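-- pv_equiv track=rewrite | github.com/soonwoohong/badgers_search_guide | search_guide_v3.py | generate_intentional_mismatches
-- ===== SOURCE A (Python) =====
-- import itertools
--
-- DNA_bases = "ACGT"
--
-- def generate_intentional_mismatches(guide: str,
--                                     num_mismatches: int,
--                                     alphabet=DNA_bases):
--     """
--     Yield the original guide first, then mutated guides with up to `max_mismatches`.
--     """
--     L = len(guide)
--     positions = range(L)
--
--     # always yield original
--     yield guide
--
--     # all unordered pairs
--     k = num_mismatches
--     #for k in range(1, max_mismatches + 1):
--         # choose which positions to mutate
--     for pos_tuple in itertools.combinations(positions, k):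
--         # for each chosen position, build the list of possible alternative bases
--         # (i.e. anything except the original base at that position)
--         choices_per_pos = [
--             [b for b in alphabet if b != guide[p]]
--             for p in pos_tuple
--         ]
--         # Cartesian product over those choices → one mutated guide per combo
--         for repl_tuple in itertools.product(*choices_per_pos):
--             guide_list = list(guide)
--             for p, new_b in zip(pos_tuple, repl_tuple):
--                 guide_list[p] = new_b
--             yield "".join(guide_list)
-- ===== SOURCE B (Python) =====
-- DNA_bases = "ACGT"
--
-- def generate_intentional_mismatches(guide: str,
--                                     num_mismatches: int,
--                                     alphabet=DNA_bases):
--     """Yield the original guide first, then every guide with exactly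
--     `num_mismatches` substitutions, via two small recursions instead of
--     itertools.combinations/product."""
--     L = len(guide)
--     yield guide
--
--     def subsets(start, k):
--         # position subsets of range(start, L) of size k, lexicographic
--         if k == 0:
--             yield []
--         elif start < L:
--             for rest in subsets(start + 1, k - 1):
--                 yield [start] + rest
--             yield from subsets(start + 1, k)
--
--     def expand(positions, cur):
--         # substitute each remaining position, leftmost varying slowest
--         if not positions:
--             yield cur
--         else:
--             p, rest = positions[0], positions[1:]
--             for b in alphabet:
--                 if b != guide[p]:
--                     yield from expand(rest, cur[:p] + b + cur[p+1:])
--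
--     for pos in subsets(0, num_mismatches):
--         yield from expand(pos, guide)
-- ===== Notes on version B (the rewrite author's own statement) =====
-- stated objective: alternative
-- what changed: Replaced the itertools.combinations + per-combination choices list + itertools.product double loop with two direct recursions: an include/exclude position-subset recursion and a string-threading expansion recursion, reproducing the same emission order.
import Mathlib
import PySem

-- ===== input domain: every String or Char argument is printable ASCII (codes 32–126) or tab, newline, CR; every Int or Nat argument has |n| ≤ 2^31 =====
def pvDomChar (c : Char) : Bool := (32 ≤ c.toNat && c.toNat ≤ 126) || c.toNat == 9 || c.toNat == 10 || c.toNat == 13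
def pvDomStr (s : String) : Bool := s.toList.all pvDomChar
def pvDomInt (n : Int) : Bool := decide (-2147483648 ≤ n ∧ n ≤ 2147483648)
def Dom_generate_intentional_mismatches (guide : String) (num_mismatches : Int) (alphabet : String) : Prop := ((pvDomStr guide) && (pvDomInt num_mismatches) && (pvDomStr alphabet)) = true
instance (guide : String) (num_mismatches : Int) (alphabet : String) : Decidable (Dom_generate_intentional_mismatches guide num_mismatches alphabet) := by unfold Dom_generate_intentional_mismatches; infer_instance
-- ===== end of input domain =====

-- B replaces itertools.combinations/product with two direct recursions (subset choice, then expansion); same order, same cost.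


-- ===== PORT A =====
-- itertools.combinations(range(L), k), ported as combinations over the (sorted) index list, lexicographic order
def pvComb : List Nat → Nat → List (List Nat)
  | _, 0 => [[]]
  | [], _ + 1 => []
  | x :: xs, k + 1 => ((pvComb xs k).map (fun t => x :: t)) ++ pvComb xs (k + 1)

-- itertools.product(*choices): leftmost factor varies slowest
def pvProd : List (List Char) → List (List Char)
  | [] => [[]]
  | c :: cs => c.flatMap (fun b => (pvProd cs).map (fun t => b :: t))

-- guide_list = list(guide); for p, new_b in zip(pos_tuple, repl_tuple): guide_list[p] = new_b
def pvApply (gl : List Char) (pos : List Nat) (repl : List Char) : List Char :=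
  (pos.zip repl).foldl (fun acc pb => acc.set pb.1 pb.2) gl

def generate_intentional_mismatches (guide : String) (num_mismatches : Int) (alphabet : String) : List String :=
  let gl := guide.toList
  let L := gl.length
  guide :: (pvComb (List.range L) num_mismatches.toNat).flatMap (fun pos_tuple =>
    let choices_per_pos := pos_tuple.map (fun p => alphabet.toList.filter (fun b => b ≠ gl.getD p ' '))
    (pvProd choices_per_pos).map (fun repl_tuple => String.mk (pvApply gl pos_tuple repl_tuple)))

-- ===== PORT B =====
-- subsets(start, k): position subsets of range(start, L) of size k, include-first (lexicographic);
-- structural recursion on the fuel L - start (the Python recursion terminates because start grows to L)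
def pvSubsetsAux (L : Nat) : Nat → Nat → Int → List (List Nat)
  | fuel, start, k =>
    if k = 0 then [[]]
    else
      match fuel with
      | 0 => []
      | f + 1 =>
        if start < L then
          ((pvSubsetsAux L f (start + 1) (k - 1)).map (fun rest => start :: rest)) ++ pvSubsetsAux L f (start + 1) k
        else []

def pvSubsets (L start : Nat) (k : Int) : List (List Nat) := pvSubsetsAux L (L - start) start k

-- expand(positions, cur): substitute each remaining position, leftmost varying slowest
def pvExpand (gl alph : List Char) : List Nat → List Char → List String
  | [], cur => [String.mk cur]
  | p :: rest, cur =>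
      (alph.filter (fun b => b ≠ gl.getD p ' ')).flatMap
        (fun b => pvExpand gl alph rest (cur.take p ++ b :: cur.drop (p + 1)))

def generate_intentional_mismatches_alt (guide : String) (num_mismatches : Int) (alphabet : String) : List String :=
  let gl := guide.toList
  guide :: (pvSubsets gl.length 0 num_mismatches).flatMap (fun pos => pvExpand gl alphabet.toList pos gl)

-- ===== PRECONDITION & SPEC =====
-- A raises ValueError for num_mismatches < 0 (itertools.combinations rejects negative r), so Pre_ excludes it.
def Pre_generate_intentional_mismatches (guide : String) (num_mismatches : Int) (alphabet : String) : Prop :=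
  0 ≤ num_mismatches
instance (guide : String) (num_mismatches : Int) (alphabet : String) : Decidable (Pre_generate_intentional_mismatches guide num_mismatches alphabet) := by unfold Pre_generate_intentional_mismatches; infer_instance
def pvWitness_generate_intentional_mismatches : String × Int × String := ("AC", 1, "ACGT")


def Spec_generate_intentional_mismatches (guide : String) (num_mismatches : Int) (alphabet : String) (out : List String) : Prop := out = generate_intentional_mismatches_alt guide num_mismatches alphabet
instance (guide : String) (num_mismatches : Int) (alphabet : String) (out : List String) : Decidable (Spec_generate_intentional_mismatches guide num_mismatches alphabet out) := by unfold Spec_generate_intentional_mismatches; infer_instance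

-- ===== CLAIM (what is proved, stated in full; the proofs are below) =====
def Claim_equal_generate_intentional_mismatches : Prop := ∀ (guide : String) (num_mismatches : Int) (alphabet : String), Dom_generate_intentional_mismatches guide num_mismatches alphabet → Pre_generate_intentional_mismatches guide num_mismatches alphabet → Spec_generate_intentional_mismatches guide num_mismatches alphabet (generate_intentional_mismatches guide num_mismatches alphabet)

-- ===== LEMMAS AND PROOFS =====

-- B's subset recursion (at full fuel) is A's combinations of the index range, for nonnegative k
lemma pvSubsetsAux_eq_pvComb : ∀ (d L start : Nat) (k : Nat), L - start = d →
    pvSubsetsAux L d start (k : Int) = pvComb (List.range' start d) k := by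
  intro d
  induction d with
  | zero =>
    intro L start k _
    cases k with
    | zero => simp [pvSubsetsAux, pvComb]
    | succ k =>
      have h0 : ((k : Int) + 1) ≠ 0 := by omega
      push_cast
      simp [pvSubsetsAux, pvComb, h0]
  | succ d ih =>
    intro L start k hd
    have hlt : start < L := by omega
    cases k with
    | zero => simp [pvSubsetsAux, pvComb]
    | succ k =>
      have h0 : ((k : Int) + 1) ≠ 0 := by omega
      have h1 : ((k : Int) + 1) - 1 = (k : Int) := by ring
      push_cast
      rw [List.range'_succ, pvSubsetsAux, if_neg h0]
      show (if start < L then _ else []) = pvComb _ (k + 1)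
      rw [if_pos hlt, pvComb, h1,
        ih L (start + 1) k (by omega),
        show ((k : Int) + 1) = ((k + 1 : Nat) : Int) by push_cast; ring,
        ih L (start + 1) (k + 1) (by omega)]

-- B's expansion recursion equals A's product-then-apply over the same per-position choices
lemma pvExpand_eq (gl alph : List Char) : ∀ (ps : List Nat) (cur : List Char),
    cur.length = gl.length → (∀ p ∈ ps, p < gl.length) →
    pvExpand gl alph ps cur
      = (pvProd (ps.map (fun p => alph.filter (fun b => b ≠ gl.getD p ' ')))).map
          (fun repl => String.mk (pvApply cur ps repl)) := by
  intro ps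
  induction ps with
  | nil => intro cur _ _; simp [pvExpand, pvProd, pvApply]
  | cons p rest ih =>
    intro cur hlen hmem
    have hp : p < cur.length := by rw [hlen]; exact hmem p (by simp)
    have hset : ∀ b : Char, cur.set p b = cur.take p ++ b :: cur.drop (p + 1) := by
      intro b; rw [List.set_eq_take_append_cons_drop, if_pos hp]
    simp only [pvExpand, List.map_cons, pvProd, List.map_flatMap]
    refine List.flatMap_congr ?_
    intro b _
    rw [← hset b,
      ih (cur.set p b) (by rw [List.length_set]; exact hlen)
        (fun q hq => hmem q (List.mem_cons_of_mem _ hq)),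
      List.map_map]
    refine List.map_congr_left ?_
    intro repl _
    simp [pvApply, Function.comp, hset]

-- members of a combination come from the source list
lemma mem_of_mem_pvComb : ∀ (xs : List Nat) (k : Nat) (t : List Nat), t ∈ pvComb xs k → ∀ p ∈ t, p ∈ xs := by
  intro xs
  induction xs with
  | nil =>
    intro k t ht p hp
    cases k with
    | zero => simp [pvComb] at ht; simp [ht] at hp
    | succ k => simp [pvComb] at ht
  | cons x xs ih =>
    intro k t ht p hp
    cases k with
    | zero => simp [pvComb] at ht; simp [ht] at hp
    | succ k =>
      simp only [pvComb, List.mem_append, List.mem_map] at ht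
      rcases ht with ⟨s, hs, rfl⟩ | ht
      · simp only [List.mem_cons] at hp
        rcases hp with rfl | hp
        · simp
        · exact List.mem_cons_of_mem _ (ih k s hs p hp)
      · exact List.mem_cons_of_mem _ (ih (k + 1) t ht p hp)

-- ===== VERDICT (by name: the statement is the Claim_ definition above) =====
theorem generate_intentional_mismatches_spec : Claim_equal_generate_intentional_mismatches := by
  intro guide num alphabet _ hpre
  unfold Spec_generate_intentional_mismatches
  unfold generate_intentional_mismatches generate_intentional_mismatches_alt
  dsimp only
  congr 1
  have hnum : ((num.toNat : Nat) : Int) = num := Int.toNat_of_nonneg hpre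
  rw [pvSubsets]
  conv_rhs => rw [← hnum]
  rw [pvSubsetsAux_eq_pvComb (guide.toList.length - 0) guide.toList.length 0 num.toNat rfl,
    Nat.sub_zero, ← List.range_eq_range']
  refine List.flatMap_congr ?_
  intro pos hpos
  rw [pvExpand_eq guide.toList alphabet.toList pos guide.toList rfl
      (fun p hp => List.mem_range.mp (mem_of_mem_pvComb _ _ _ hpos p hp))]
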